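-- pv_equiv track=rewrite | github.com/dainsiahtill-dev/Polaris | src/backend/polaris/cells/roles/kernel/internal/transaction/read_strategy.py | _split_remaining_ranges
-- ===== SOURCE A (Python) =====
-- def _split_uniformly(total_lines: int, slice_size: int) -> list[tuple[int, int]]:
--     """均匀分割文件为多个范围。"""
--     ranges: list[tuple[int, int]] = []
--     start = 1
--
--     while start <= total_lines:
--         end = min(start + slice_size - 1, total_lines)
--         ranges.append((start, end))
--         start = end + 1
--
--     return ranges
--
-- def _split_remaining_ranges(
--     total_lines: int,
--     slice_size: int,
--     excluded_ranges: list[tuple[int, int]],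
-- ) -> list[tuple[int, int]]:
--     """分割未被排除的范围。"""
--     if not excluded_ranges:
--         return _split_uniformly(total_lines, slice_size)
--
--     # 合并已排除的范围
--     sorted_excluded = sorted(excluded_ranges, key=lambda x: x[0])
--     merged_excluded: list[tuple[int, int]] = []
--     for start, end in sorted_excluded:
--         if merged_excluded and start <= merged_excluded[-1][1] + 1:
--             merged_excluded[-1] = (merged_excluded[-1][0], max(merged_excluded[-1][1], end))
--         else:
--             merged_excluded.append((start, end))
--
--     # 计算剩余范围
--     ranges: list[tuple[int, int]] = []
--     current_start = 1
--
--     for excl_start, excl_end in merged_excluded: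
--         if current_start < excl_start:
--             # 添加当前范围之前的分段
--             remaining_start = current_start
--             while remaining_start < excl_start:
--                 remaining_end = min(remaining_start + slice_size - 1, excl_start - 1)
--                 ranges.append((remaining_start, remaining_end))
--                 remaining_start = remaining_end + 1
--         current_start = max(current_start, excl_end + 1)
--
--     # 添加最后一个排除范围之后的部分
--     while current_start <= total_lines:
--         end = min(current_start + slice_size - 1, total_lines)
--         ranges.append((current_start, end))
--         current_start = end + 1
--
--     return ranges
-- ===== SOURCE B (Python) =====
-- def _split_remaining_ranges(
--     total_lines: int,
--     slice_size: int,
--     excluded_ranges: list[tuple[int, int]],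
-- ) -> list[tuple[int, int]]:
--     def slices(lo: int, hi: int) -> list[tuple[int, int]]:
--         # arithmetic slicing: one slice per step point, no while loop
--         return [(s, min(s + slice_size - 1, hi)) for s in range(lo, hi + 1, slice_size)]
--
--     def go(pairs: list[tuple[int, int]], cur: int, cs: int, ce: int) -> list[tuple[int, int]]:
--         # one fused recursion: cluster (cs, ce) is the open run of touching
--         # exclusions; when it closes, its preceding gap is emitted directly.
--         if pairs:
--             s, e = pairs[0]
--             if s <= ce + 1:
--                 return go(pairs[1:], cur, cs, max(ce, e))
--             head = slices(cur, cs - 1) if cur < cs else []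
--             return head + go(pairs[1:], max(cur, ce + 1), s, e)
--         head = slices(cur, cs - 1) if cur < cs else []
--         return head + slices(max(cur, ce + 1), total_lines)
--
--     if not excluded_ranges:
--         return slices(1, total_lines)
--     pairs = sorted(excluded_ranges, key=lambda x: x[0])
--     (s0, e0) = pairs[0]
--     return go(pairs[1:], 1, s0, e0)
-- ===== Notes on version B (the rewrite author's own statement) =====
-- stated objective: alternative
-- what changed: A runs three staged loops (a left fold building an intermediate merged-exclusions list, then a walk over that list with a nested gap while-loop, then a trailing while-loop); B deletes the intermediate list entirely, fusing clustering and emission into a single recursion over the sorted exclusions that carries the open cluster (cs, ce), and emits each block of slices in closed form over range(lo, hi+1, slice_size) instead of while-loops.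
-- outside the precondition, e.g. on _split_remaining_ranges(0, 0, [(1, 2)]): A returns [], B raises ValueError; on _split_remaining_ranges(-1, -1, [(0, 0), (1, 1)]): A returns [], B returns [(2, -1), (1, -1)]
import Mathlib
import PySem

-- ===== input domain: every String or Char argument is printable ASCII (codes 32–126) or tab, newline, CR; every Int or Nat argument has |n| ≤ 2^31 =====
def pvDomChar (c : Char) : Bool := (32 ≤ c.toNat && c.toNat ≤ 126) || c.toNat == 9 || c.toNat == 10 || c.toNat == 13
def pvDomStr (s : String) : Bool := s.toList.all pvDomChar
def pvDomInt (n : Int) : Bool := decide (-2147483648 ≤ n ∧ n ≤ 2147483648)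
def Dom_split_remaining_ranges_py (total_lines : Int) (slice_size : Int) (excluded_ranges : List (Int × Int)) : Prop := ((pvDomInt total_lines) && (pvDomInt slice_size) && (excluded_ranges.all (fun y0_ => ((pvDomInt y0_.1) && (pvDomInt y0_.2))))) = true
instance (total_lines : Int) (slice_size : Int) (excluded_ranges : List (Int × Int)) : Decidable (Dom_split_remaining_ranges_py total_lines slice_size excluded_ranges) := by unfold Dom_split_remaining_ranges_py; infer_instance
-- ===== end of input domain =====

-- B fuses A's three stages (fold-merge into an intermediate list, per-gap while-loops, trailing
-- while-loop) into one recursion over the sorted exclusions, emitting each block of slices in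
-- closed form over range(lo, hi+1, slice_size): an alternative decomposition, same cost.

-- ===== PORT A =====
-- the while loop of _split_uniformly (also textually the trailing while of _split_remaining_ranges);
-- fuel-based: with slice_size ≥ 1 the given fuel always suffices (Pre_ excludes slice_size < 1,
-- where the Python loop cannot advance).
def whileSliceA (total ss : Int) : Int → Nat → List (Int × Int)
  | _, 0 => []
  | start, Nat.succ fuel =>
    if start ≤ total then
      let e := min (start + ss - 1) total
      (start, e) :: whileSliceA total ss (e + 1) fuel
    else []

def split_uniformlyA (total ss : Int) : List (Int × Int) :=
  whileSliceA total ss 1 total.toNat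

-- merge loop body; the accumulator is kept newest-first (Python appends / updates merged[-1]), reversed at the end
def mergeStepA (acc : List (Int × Int)) (p : Int × Int) : List (Int × Int) :=
  match acc with
  | (ms, me) :: rest => if p.1 ≤ me + 1 then (ms, max me p.2) :: rest else p :: (ms, me) :: rest
  | [] => [p]

-- the inner 'while remaining_start < excl_start' loop
def gapLoopA (es ss : Int) : Int → Nat → List (Int × Int)
  | _, 0 => []
  | rs, Nat.succ fuel =>
    if rs < es then
      let re := min (rs + ss - 1) (es - 1)
      (rs, re) :: gapLoopA es ss (re + 1) fuel
    else []

-- the 'for excl_start, excl_end in merged_excluded' loop, followed by the trailing while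
def procA (total ss : Int) : Int → List (Int × Int) → List (Int × Int)
  | cur, [] => whileSliceA total ss cur (total - cur + 1).toNat
  | cur, (s, e) :: rest =>
      (if cur < s then gapLoopA s ss cur (s - cur).toNat else []) ++ procA total ss (max cur (e + 1)) rest

def split_remaining_ranges_py (total_lines : Int) (slice_size : Int) (excluded_ranges : List (Int × Int)) : List (Int × Int) :=
  if excluded_ranges = [] then split_uniformlyA total_lines slice_size
  else
    let sortedExcluded := PySem.List.sorted excluded_ranges (fun p => p.1) false
    let merged := (sortedExcluded.foldl mergeStepA []).reverse
    procA total_lines slice_size 1 merged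

-- ===== PORT B =====
-- Source B's 'slices': arithmetic slicing, one slice per point of range(lo, hi+1, slice_size)
def slicesB (ss lo hi : Int) : List (Int × Int) :=
  (PySem.List.pyRange lo (hi + 1) ss).map (fun s => (s, min (s + ss - 1) hi))

-- Source B's 'go': one fused recursion; (cs, ce) is the open cluster of touching exclusions,
-- whose preceding gap is emitted directly when it closes
def goB (total ss : Int) : List (Int × Int) → Int → Int → Int → List (Int × Int)
  | (s, e) :: rest, cur, cs, ce =>
    if s ≤ ce + 1 then goB total ss rest cur cs (max ce e)
    else (if cur < cs then slicesB ss cur (cs - 1) else []) ++ goB total ss rest (max cur (ce + 1)) s e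
  | [], cur, cs, ce =>
    (if cur < cs then slicesB ss cur (cs - 1) else []) ++ slicesB ss (max cur (ce + 1)) total

def split_remaining_ranges_py_alt (total_lines : Int) (slice_size : Int) (excluded_ranges : List (Int × Int)) : List (Int × Int) :=
  if excluded_ranges = [] then slicesB slice_size 1 total_lines
  else
    match PySem.List.sorted excluded_ranges (fun p => p.1) false with
    | [] => []  -- unreachable: sorting a nonempty list is nonempty
    | p :: rest => goB total_lines slice_size rest 1 p.1 p.2

-- ===== PRECONDITION & SPEC =====
-- Pre_ excludes slice_size < 1: there A's while loops cannot advance, so A diverges whenever any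
-- non-excluded line exists, and on the remaining fully-excluded inputs (where A returns []) B's
-- range-based slicing raises ValueError (step 0) or yields a descending range (negative step).
def Pre_split_remaining_ranges_py (total_lines : Int) (slice_size : Int) (excluded_ranges : List (Int × Int)) : Prop :=
  1 ≤ slice_size
instance (total_lines : Int) (slice_size : Int) (excluded_ranges : List (Int × Int)) : Decidable (Pre_split_remaining_ranges_py total_lines slice_size excluded_ranges) := by unfold Pre_split_remaining_ranges_py; infer_instance

def pvWitness_split_remaining_ranges_py : Int × Int × (List (Int × Int)) := (10, 3, [(2, 4)])

def Spec_split_remaining_ranges_py (total_lines : Int) (slice_size : Int) (excluded_ranges : List (Int × Int)) (out : List (Int × Int)) : Prop := out = split_remaining_ranges_py_alt total_lines slice_size excluded_ranges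
instance (total_lines : Int) (slice_size : Int) (excluded_ranges : List (Int × Int)) (out : List (Int × Int)) : Decidable (Spec_split_remaining_ranges_py total_lines slice_size excluded_ranges out) := by unfold Spec_split_remaining_ranges_py; infer_instance

-- ===== CLAIM (what is proved, stated in full; the proofs are below) =====
def Claim_equal_split_remaining_ranges_py : Prop := ∀ (total_lines : Int) (slice_size : Int) (excluded_ranges : List (Int × Int)), Dom_split_remaining_ranges_py total_lines slice_size excluded_ranges → Pre_split_remaining_ranges_py total_lines slice_size excluded_ranges → Spec_split_remaining_ranges_py total_lines slice_size excluded_ranges (split_remaining_ranges_py total_lines slice_size excluded_ranges)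

-- ===== LEMMAS AND PROOFS =====

-- unfold lemmas for pyRange with a positive step
lemma pyRange_pos_nil (a b s : Int) (hs : 0 < s) (hab : b ≤ a) :
    PySem.List.pyRange a b s = [] := by
  rw [PySem.List.pyRange_of_pos a b hs]
  simp [not_lt.mpr hab]

lemma pyRange_pos_cons (a b s : Int) (hs : 0 < s) (hab : a < b) :
    PySem.List.pyRange a b s = a :: PySem.List.pyRange (a + s) b s := by
  rw [PySem.List.pyRange_of_pos a b hs, PySem.List.pyRange_of_pos (a + s) b hs]
  by_cases h2 : a + s < b
  · have hq : (b - a + s - 1) / s = (b - (a + s) + s - 1) / s + 1 := by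
      have hdiv := Int.add_mul_ediv_right (b - (a + s) + s - 1) 1 (by omega : s ≠ 0)
      rw [show b - (a + s) + s - 1 + 1 * s = b - a + s - 1 by ring] at hdiv
      omega
    have hn : ((b - a + s - 1) / s).toNat = ((b - (a + s) + s - 1) / s).toNat + 1 := by
      have h0 : 0 ≤ (b - (a + s) + s - 1) / s :=
        Int.ediv_nonneg (by omega) (by omega)
      omega
    simp only [if_pos hab, if_pos h2, hn, List.range_succ_eq_map, List.map_cons, List.map_map]
    refine congrArg₂ List.cons (by simp) ?_
    apply List.map_congr_left
    intro k _
    simp only [Function.comp_apply, Nat.succ_eq_add_one]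
    push_cast
    ring
  · -- exactly one element: s ≤ b - a + s - 1 < 2s, so the count is 1
    have hq : (b - a + s - 1) / s = 1 := by
      have h1 := Int.add_mul_ediv_right (b - a - 1) 1 (by omega : s ≠ 0)
      rw [show b - a - 1 + 1 * s = b - a + s - 1 by ring] at h1
      have h2' : (b - a - 1) / s = 0 := Int.ediv_eq_zero_of_lt (by omega) (by omega)
      omega
    simp [if_pos hab, not_lt.mpr (not_lt.mp h2), hq, List.range_succ]

-- A's uniform while loop computes B's closed-form slicing
lemma whileSliceA_eq_slicesB (total ss : Int) (hss : 1 ≤ ss) :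
    ∀ (fuel : Nat) (start : Int), (total - start + 1).toNat ≤ fuel →
      whileSliceA total ss start fuel = slicesB ss start total := by
  intro fuel
  induction fuel with
  | zero =>
    intro start h
    have hnil : PySem.List.pyRange start (total + 1) ss = [] :=
      pyRange_pos_nil start (total + 1) ss (by omega) (by omega)
    simp only [whileSliceA, slicesB, hnil, List.map_nil]
  | succ fuel ih =>
    intro start h
    by_cases hle : start ≤ total
    · have hcons := pyRange_pos_cons start (total + 1) ss (by omega) (by omega)
      have key : slicesB ss start total
          = (start, min (start + ss - 1) total) ::
            List.map (fun s => (s, min (s + ss - 1) total)) (PySem.List.pyRange (start + ss) (total + 1) ss) := by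
        unfold slicesB
        rw [hcons]
        rfl
      simp only [whileSliceA, if_pos hle, key]
      refine congrArg _ ?_
      by_cases hfit : start + ss - 1 ≤ total
      · rw [min_eq_left hfit]
        rw [show start + ss - 1 + 1 = start + ss by ring, ih (start + ss) (by omega)]
        rfl
      · rw [min_eq_right (by omega)]
        rw [ih (total + 1) (by omega)]
        have e1 : PySem.List.pyRange (total + 1) (total + 1) ss = [] :=
          pyRange_pos_nil (total + 1) (total + 1) ss (by omega) (le_refl _)
        have e2 : PySem.List.pyRange (start + ss) (total + 1) ss = [] :=
          pyRange_pos_nil (start + ss) (total + 1) ss (by omega) (by omega)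
        unfold slicesB
        rw [e1, e2]
    · have hnil : PySem.List.pyRange start (total + 1) ss = [] :=
        pyRange_pos_nil start (total + 1) ss (by omega) (by omega)
      simp only [whileSliceA, if_neg hle, slicesB, hnil, List.map_nil]

-- A's gap while loop computes B's closed-form slicing of [rs, es-1]
lemma gapLoopA_eq_slicesB (es ss : Int) (hss : 1 ≤ ss) :
    ∀ (fuel : Nat) (rs : Int), (es - rs).toNat ≤ fuel →
      gapLoopA es ss rs fuel = slicesB ss rs (es - 1) := by
  intro fuel
  induction fuel with
  | zero =>
    intro rs h
    have hnil : PySem.List.pyRange rs (es - 1 + 1) ss = [] :=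
      pyRange_pos_nil rs (es - 1 + 1) ss (by omega) (by omega)
    simp only [gapLoopA, slicesB, hnil, List.map_nil]
  | succ fuel ih =>
    intro rs h
    by_cases hlt : rs < es
    · have hcons := pyRange_pos_cons rs (es - 1 + 1) ss (by omega) (by omega)
      have key : slicesB ss rs (es - 1)
          = (rs, min (rs + ss - 1) (es - 1)) ::
            List.map (fun s => (s, min (s + ss - 1) (es - 1))) (PySem.List.pyRange (rs + ss) (es - 1 + 1) ss) := by
        unfold slicesB
        rw [hcons]
        rfl
      simp only [gapLoopA, if_pos hlt, key]
      refine congrArg _ ?_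
      by_cases hfit : rs + ss - 1 ≤ es - 1
      · rw [min_eq_left hfit]
        rw [show rs + ss - 1 + 1 = rs + ss by ring, ih (rs + ss) (by omega)]
        rfl
      · rw [min_eq_right (by omega)]
        rw [ih (es - 1 + 1) (by omega)]
        have e1 : PySem.List.pyRange (es - 1 + 1) (es - 1 + 1) ss = [] :=
          pyRange_pos_nil (es - 1 + 1) (es - 1 + 1) ss (by omega) (le_refl _)
        have e2 : PySem.List.pyRange (rs + ss) (es - 1 + 1) ss = [] :=
          pyRange_pos_nil (rs + ss) (es - 1 + 1) ss (by omega) (by omega)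
        unfold slicesB
        rw [e1, e2]
    · have hnil : PySem.List.pyRange rs (es - 1 + 1) ss = [] :=
        pyRange_pos_nil rs (es - 1 + 1) ss (by omega) (by omega)
      simp only [gapLoopA, if_neg hlt, slicesB, hnil, List.map_nil]

-- recursive form of A's fold-merge (proof device): current open cluster (cs, ce)
def mergeRec : List (Int × Int) → Int → Int → List (Int × Int)
  | [], cs, ce => [(cs, ce)]
  | (s, e) :: rest, cs, ce =>
    if s ≤ ce + 1 then mergeRec rest cs (max ce e) else (cs, ce) :: mergeRec rest s e

lemma foldl_mergeStepA_eq_mergeRec :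
    ∀ (rest : List (Int × Int)) (acc : List (Int × Int)) (cs ce : Int),
      (rest.foldl mergeStepA ((cs, ce) :: acc)).reverse = acc.reverse ++ mergeRec rest cs ce := by
  intro rest
  induction rest with
  | nil => intro acc cs ce; simp [mergeRec]
  | cons p rest ih =>
    intro acc cs ce
    obtain ⟨s, e⟩ := p
    by_cases h : s ≤ ce + 1
    · simp only [List.foldl_cons, mergeStepA, if_pos h, mergeRec]
      rw [ih]
    · simp only [List.foldl_cons, mergeStepA, if_neg h, mergeRec]
      rw [ih ((cs, ce) :: acc) s e]
      simp

-- the fused recursion of B equals A's walk over the recursively merged clusters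
lemma goB_eq_procA_mergeRec (total ss : Int) (hss : 1 ≤ ss) :
    ∀ (pairs : List (Int × Int)) (cur cs ce : Int),
      goB total ss pairs cur cs ce = procA total ss cur (mergeRec pairs cs ce) := by
  intro pairs
  induction pairs with
  | nil =>
    intro cur cs ce
    simp only [goB, mergeRec, procA]
    congr 1
    · split_ifs with h
      · exact (gapLoopA_eq_slicesB cs ss hss _ cur (le_refl _)).symm
      · rfl
    · exact (whileSliceA_eq_slicesB total ss hss _ (max cur (ce + 1)) (le_refl _)).symm
  | cons p rest ih =>
    intro cur cs ce
    obtain ⟨s, e⟩ := p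
    by_cases h : s ≤ ce + 1
    · simp only [goB, mergeRec, if_pos h]
      exact ih cur cs (max ce e)
    · simp only [goB, mergeRec, if_neg h, procA]
      congr 1
      · split_ifs with h2
        · exact (gapLoopA_eq_slicesB cs ss hss _ cur (le_refl _)).symm
        · rfl
      · exact ih (max cur (ce + 1)) s e

-- ===== VERDICT (by name: the statement is the Claim_ definition above) =====
theorem split_remaining_ranges_py_spec : Claim_equal_split_remaining_ranges_py := by
  intro total ss ex _hdom hpre
  unfold Spec_split_remaining_ranges_py
  unfold split_remaining_ranges_py split_remaining_ranges_py_alt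
  by_cases hex : ex = []
  · simp only [if_pos hex]
    unfold split_uniformlyA
    exact whileSliceA_eq_slicesB total ss hpre _ 1 (by omega)
  · simp only [if_neg hex]
    have hlen : (PySem.List.sorted ex (fun p => p.1) false).length = ex.length :=
      PySem.List.length_sorted ex _ false
    cases hs : PySem.List.sorted ex (fun p => p.1) false with
    | nil =>
      exfalso
      rw [hs] at hlen
      exact hex (List.length_eq_zero_iff.mp hlen.symm)
    | cons p rest =>
      obtain ⟨s0, e0⟩ := p
      simp only [List.foldl_cons]
      have hm : mergeStepA [] (s0, e0) = [(s0, e0)] := rfl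
      rw [hm, show ([(s0, e0)] : List (Int × Int)) = (s0, e0) :: [] from rfl,
        foldl_mergeStepA_eq_mergeRec rest [] s0 e0]
      simp only [List.reverse_nil, List.nil_append]
      exact (goB_eq_procA_mergeRec total ss hpre rest 1 s0 e0).symm
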